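-- pv_equiv track=rewrite | github.com/lea-cohausz/causalfair | causalfair/causalfair.py | remove_sublists
-- ===== SOURCE A (Python) =====
-- def iter_paths(adj, min_length=2, path=None):
--     '''
--     Performs Depth-First-Search to find all paths from the adjacency matrix;
--     Returns all paths, only used inside remove_sublists().
--     '''
--     if not path:
--         for start_node in range(len(adj)):
--             yield from iter_paths(adj, min_length, [start_node])
--     else:
--         if len(path) >= min_length:
--             yield path
--         if path[-1] in path[:-1]:
--             return
--         current_node = path[-1]
--         for next_node in range(len(adj[current_node])):
--             if adj[current_node][next_node] == 1 or adj[current_node][next_node] == -1: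
--                 yield from iter_paths(adj, min_length, path + [next_node])
--
-- def remove_sublists(adjacency_matrix):
--     '''
--     Removes subpaths found with the DFS algorithm and returns only the complete paths.
--     Used inside identify_structures().
--     '''
--     lst = list(iter_paths(adjacency_matrix))
--     helper_lst = [[str(e) for e in sublist] for sublist in lst]
--     str_list = [''.join(sublist) for sublist in helper_lst]
--
--     entailed_strings = []
--     for i in range(len(str_list)):
--         for j in range(len(str_list)):
--             if i != j and str_list[i] in str_list[j]:
--                 entailed_strings.append(str_list[i])
--
--     entailed_strings = list(set(entailed_strings))
--
--     helper_lst2 = [list(e) for e in entailed_strings]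
--     removal_lst = [[int(e) for e in sublist] for sublist in helper_lst2]
--
--     result = [sublist_A for sublist_A in lst if sublist_A not in removal_lst]
--     return result
-- ===== SOURCE B (Python) =====
-- def remove_sublists(adjacency_matrix):
--     # Iterative depth-first search with an explicit stack: collect every walk of
--     # length >= 2, stopping a branch once its endpoint revisits an earlier node.
--     paths = []
--     stack = [[i] for i in range(len(adjacency_matrix) - 1, -1, -1)]
--     while stack:
--         path = stack.pop()
--         if len(path) >= 2:
--             paths.append(path)
--         if path[-1] in path[:-1]:
--             continue
--         row = adjacency_matrix[path[-1]]
--         for j in range(len(row) - 1, -1, -1):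
--             if row[j] == 1 or row[j] == -1:
--                 stack.append(path + [j])
--
--     # Encode each walk as its concatenated decimal string; a string is entailed
--     # if it occurs twice, or occurs inside a different string.  Instead of
--     # testing every string against every other, enumerate each string's
--     # substrings once and look them up in a hash table.
--     strs = [''.join(str(e) for e in p) for p in paths]
--     counts = {}
--     for s in strs:
--         counts[s] = counts.get(s, 0) + 1
--     entailed = {s for s in counts if counts[s] > 1}
--     for t in counts:
--         for i in range(len(t)):
--             for j in range(i + 1, len(t) + 1):
--                 s = t[i:j]
--                 if s != t and s in counts:
--                     entailed.add(s)
--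
--     # Decode the entailed strings back to walks and drop exactly those walks.
--     removal = {tuple(int(c) for c in s) for s in entailed}
--     return [p for p in paths if tuple(p) not in removal]
-- ===== Notes on version B (the rewrite author's own statement) =====
-- stated objective: alternative
-- what changed: B enumerates the DFS walks iteratively with an explicit stack instead of A's recursive generator, counts each path-string once in a dict, and finds the entailed strings by enumerating every string's substrings against that hash table (duplicates via the count) instead of A's all-pairs index loops with repeated 'in' tests; the final filter is one set-membership test per path instead of A's scan over removal_lst; Pre_ excludes only the matrices on which A raises IndexError (a +-1 edge entry in a column >= the number of rows).
import Mathlib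
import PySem

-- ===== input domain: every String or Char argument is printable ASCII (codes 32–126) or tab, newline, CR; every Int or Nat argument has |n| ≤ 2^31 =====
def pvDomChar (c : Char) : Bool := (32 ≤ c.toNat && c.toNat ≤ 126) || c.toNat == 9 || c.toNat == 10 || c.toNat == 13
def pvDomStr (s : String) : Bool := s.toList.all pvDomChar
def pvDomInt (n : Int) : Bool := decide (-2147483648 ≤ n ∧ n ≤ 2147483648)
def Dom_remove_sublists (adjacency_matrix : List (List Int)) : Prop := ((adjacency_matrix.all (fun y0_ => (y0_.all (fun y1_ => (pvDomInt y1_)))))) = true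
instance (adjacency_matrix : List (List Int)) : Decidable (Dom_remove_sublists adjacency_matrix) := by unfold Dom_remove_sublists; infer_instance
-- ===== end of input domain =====

-- B enumerates the DFS walks with an explicit stack instead of a recursive generator, and
-- finds the entailed path-strings by enumerating each string's substrings once against a
-- hash table (occurrence counts + membership) instead of A's all-pairs containment loops;
-- the final filter is one set-membership test per path ("alternative": same results on Pre_).

-- ===== PORT A =====
-- iter_paths(adj, 2, path): the fuel argument only makes the recursion structural;
-- adjacency_matrix.length + 1 bounds the recursion depth of every search A performs under Pre_.
def iterPathsA (adj : List (List Int)) (path : List Int) : Nat → List (List Int)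
  | 0 => []
  | fuel+1 =>
    let y := if 2 ≤ path.length then [path] else []          -- if len(path) >= min_length: yield path
    let last := PySem.List.pyGetD path (-1) 0                -- path[-1] (path is never empty here)
    if (PySem.List.slice path none (some (-1))).contains last then y   -- if path[-1] in path[:-1]: return
    else
      let row := PySem.List.pyGetD adj last []               -- adj[current_node]; in range under Pre_
      y ++ (List.range row.length).foldl
        (fun acc j => if row.getD j 0 = 1 ∨ row.getD j 0 = -1
          then acc ++ iterPathsA adj (path ++ [(j : Int)]) fuel else acc) []

-- list(set(entailed_strings)) is ported as PySem.Set.ofList: CPython's hash iteration order is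
-- not modelled, but only MEMBERSHIP in removal_lst is used, so the result does not depend on it.
def remove_sublists (adjacency_matrix : List (List Int)) : List (List Int) :=
  let lst := (List.range adjacency_matrix.length).foldl
      (fun acc (i : Nat) => acc ++ iterPathsA adjacency_matrix [(i : Int)] (adjacency_matrix.length + 1)) []
  let helper_lst := lst.map (fun sub => sub.map (fun e => PySem.Int.toChars e))
  let str_list := helper_lst.map (fun sub => PySem.Chars.join [] sub)
  let entailed := (List.range str_list.length).foldl (fun acc i =>
      (List.range str_list.length).foldl (fun acc2 j =>
        if (!(i == j) && PySem.Chars.isIn (str_list.getD i []) (str_list.getD j [])) then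
          acc2 ++ [str_list.getD i []] else acc2) acc) []
  -- helper_lst2 = [list(e) for e in entailed]: a string IS its char list here, so it is merged
  -- into removal_lst; int(e) on a 1-char digit string never raises, .getD 0 is unreachable.
  let removal_lst := (PySem.Set.ofList entailed).map
      (fun t => t.map (fun c => (PySem.Int.ofChars? [c]).getD 0))
  lst.filter (fun sub => !(removal_lst.contains sub))

-- ===== PORT B =====
-- the while-stack loop of Source B; the stack is modelled top-first (stack.pop() = head,
-- stack.append = cons), so Python's descending pushes become a foldl of conses; the fuel
-- argument only makes the loop structural (it counts pops and is proved sufficient below).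
def loopB (adj : List (List Int)) : List (List Int) → Nat → List (List Int)
  | _, 0 => []
  | [], _ => []
  | path :: rest, fuel+1 =>
    let y := if 2 ≤ path.length then [path] else []          -- if len(path) >= 2: paths.append(path)
    let last := PySem.List.pyGetD path (-1) 0                -- path[-1]
    if (PySem.List.slice path none (some (-1))).contains last then   -- if path[-1] in path[:-1]: continue
      y ++ loopB adj rest fuel
    else
      let row := PySem.List.pyGetD adj last []               -- adjacency_matrix[path[-1]]
      y ++ loopB adj ((PySem.List.pyRange ((row.length : Int) - 1) (-1) (-1)).foldl
          (fun st j => if PySem.List.pyGetD row j 0 = 1 ∨ PySem.List.pyGetD row j 0 = -1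
            then (path ++ [j]) :: st else st) rest) fuel

def remove_sublists_alt (adjacency_matrix : List (List Int)) : List (List Int) :=
  let n := adjacency_matrix.length
  let m := (adjacency_matrix.map List.length).foldl max 0
  -- stack = [[i] for i in range(n-1,-1,-1)], top-first
  let stack0 := (PySem.List.pyRange ((n : Int) - 1) (-1) (-1)).foldl (fun st i => [i] :: st) []
  let paths := loopB adjacency_matrix stack0 ((n + 1) * (m + 1) ^ (n + 1) + 1)
  let strs := paths.map (fun p => PySem.Chars.join [] (p.map (fun e => PySem.Int.toChars e)))
  let counts := strs.foldl (fun d s => d.insert s (d.getD s 0 + 1))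
      (PySem.Dict.empty : PySem.Dict (List Char) Int)
  -- the three set builders are ported as PySem.Set folds: CPython's set/dict iteration
  -- order is not modelled, but only MEMBERSHIP in the sets is used downstream
  let entailed0 := counts.keys.foldl (fun acc s =>
      if 1 < counts.getD s 0 then PySem.Set.add acc s else acc)
      (PySem.Set.empty : PySem.Set (List Char))
  let entailed := counts.keys.foldl (fun acc t =>
      (List.range t.length).foldl (fun acc2 (i : Nat) =>
        (PySem.List.pyRange ((i : Int) + 1) ((t.length : Int) + 1) 1).foldl (fun acc3 j =>
          if PySem.List.slice t (some (i : Int)) (some j) ≠ t ∧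
             counts.contains (PySem.List.slice t (some (i : Int)) (some j)) then
            PySem.Set.add acc3 (PySem.List.slice t (some (i : Int)) (some j)) else acc3) acc2) acc)
      entailed0
  -- removal = {tuple(int(c) for c in s) for s in entailed}; int(c) on a digit never raises
  let removal := PySem.Set.ofList (entailed.map (fun s => s.map (fun c => (PySem.Int.ofChars? [c]).getD 0)))
  paths.filter (fun p => !(removal.contains p))

-- ===== PRECONDITION & SPEC =====
-- Pre_ excludes exactly the matrices on which Python A raises IndexError: a ±1 edge entry
-- sitting in a column ≥ len(adjacency_matrix) makes the DFS index a missing row.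
def Pre_remove_sublists (adjacency_matrix : List (List Int)) : Prop :=
  (adjacency_matrix.all (fun row => (List.range row.length).all (fun j =>
     !((row.getD j 0 == 1) || (row.getD j 0 == -1)) || decide (j < adjacency_matrix.length)))) = true
instance (adjacency_matrix : List (List Int)) : Decidable (Pre_remove_sublists adjacency_matrix) := by
  unfold Pre_remove_sublists; infer_instance
def pvWitness_remove_sublists : List (List Int) := [[0, 1], [1, 0]]

def Spec_remove_sublists (adjacency_matrix : List (List Int)) (out : List (List Int)) : Prop := out = remove_sublists_alt adjacency_matrix
instance (adjacency_matrix : List (List Int)) (out : List (List Int)) : Decidable (Spec_remove_sublists adjacency_matrix out) := by unfold Spec_remove_sublists; infer_instance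

-- ===== CLAIM (what is proved, stated in full; the proofs are below) =====
def Claim_equal_remove_sublists : Prop := ∀ (adjacency_matrix : List (List Int)), Dom_remove_sublists adjacency_matrix → Pre_remove_sublists adjacency_matrix → Spec_remove_sublists adjacency_matrix (remove_sublists adjacency_matrix)


-- ===== LEMMAS AND PROOFS =====

theorem foldl_if_append_eq {α β : Type} (c : α → Prop) [DecidablePred c] (f : α → List β)
    (l : List α) (init : List β) :
    l.foldl (fun acc j => if c j then acc ++ f j else acc) init
      = init ++ l.flatMap (fun j => if c j then f j else []) := by
  rw [PySem.List.foldl_congr_mem l _ (fun acc j => acc ++ (if c j then f j else []))]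
  · exact PySem.List.foldl_append_eq_flatMap _ l init
  · intro acc x _; split <;> simp

theorem flatMap_if_filter {α β : Type} (c : α → Prop) [DecidablePred c] (g : α → List β)
    (l : List α) :
    l.flatMap (fun x => if c x then g x else [])
      = (l.filter (fun x => decide (c x))).flatMap g := by
  induction l with
  | nil => rfl
  | cons a l ih =>
    simp only [List.flatMap_cons, List.filter_cons]
    by_cases hc : c a <;> simp [hc, ih]

theorem foldl_cons_if_rev {α β : Type} (c : α → Prop) [DecidablePred c] (g : α → β) :
    ∀ (l : List α) (init : List β),
    l.foldl (fun st x => if c x then g x :: st else st) init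
      = ((l.reverse.filter (fun x => decide (c x))).map g) ++ init := by
  intro l
  induction l with
  | nil => intro init; simp
  | cons a l ih =>
    intro init
    simp only [List.foldl_cons, List.reverse_cons, List.filter_append, List.map_append,
      List.append_assoc]
    rw [ih]
    by_cases hc : c a <;> simp [hc]

def pvStop (path : List Int) : Bool :=
  (PySem.List.slice path none (some (-1))).contains (PySem.List.pyGetD path (-1) 0)

def pvRow (adj : List (List Int)) (path : List Int) : List Int :=
  PySem.List.pyGetD adj (PySem.List.pyGetD path (-1) 0) []

def pvChildren (adj : List (List Int)) (path : List Int) : List Nat :=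
  (List.range (pvRow adj path).length).filter
    (fun j => decide ((pvRow adj path).getD j 0 = 1 ∨ (pvRow adj path).getD j 0 = -1))

theorem iterPathsA_succ (adj : List (List Int)) (path : List Int) (f : Nat) :
    iterPathsA adj path (f+1)
      = (if 2 ≤ path.length then [path] else [])
        ++ (if pvStop path then []
            else (pvChildren adj path).flatMap (fun j : Nat => iterPathsA adj (path ++ [(j : Int)]) f)) := by
  by_cases hs : pvStop path = true
  · have hs' := hs
    unfold pvStop at hs'
    simp only [iterPathsA, hs', if_true, hs, List.append_nil]
  · have hs' := hs
    unfold pvStop at hs'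
    simp only [iterPathsA, hs', Bool.false_eq_true, if_false, hs]
    rw [foldl_if_append_eq (fun j => (PySem.List.pyGetD adj (PySem.List.pyGetD path (-1) 0) []).getD j 0 = 1 ∨ (PySem.List.pyGetD adj (PySem.List.pyGetD path (-1) 0) []).getD j 0 = -1)
        (fun j => iterPathsA adj (path ++ [(j : Int)]) f)]
    rw [List.nil_append, flatMap_if_filter]
    rfl

theorem pvRow_mem_or_nil (adj : List (List Int)) (path : List Int) :
    pvRow adj path ∈ adj ∨ pvRow adj path = [] := by
  unfold pvRow PySem.List.pyGetD
  cases h : PySem.List.pyGet? adj ((PySem.List.pyGet? path (-1)).getD 0) with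
  | none => right; rfl
  | some v =>
    left
    rw [Option.getD_some]
    exact PySem.List.mem_of_pyGet?_eq_some adj h

theorem push_eq (adj : List (List Int)) (path : List Int) (rest : List (List Int)) :
    (PySem.List.pyRange (((pvRow adj path).length : Int) - 1) (-1) (-1)).foldl
        (fun st j => if PySem.List.pyGetD (pvRow adj path) j 0 = 1 ∨ PySem.List.pyGetD (pvRow adj path) j 0 = -1
          then (path ++ [j]) :: st else st) rest
      = (pvChildren adj path).map (fun j : Nat => path ++ [(j : Int)]) ++ rest := by
  rw [foldl_cons_if_rev (fun j : Int => PySem.List.pyGetD (pvRow adj path) j 0 = 1 ∨ PySem.List.pyGetD (pvRow adj path) j 0 = -1) (fun j : Int => path ++ [j])]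
  rw [PySem.List.pyRange_neg_one_eq_reverse, List.reverse_reverse]
  have h1 : ((-1 : Int) + 1) = 0 := by norm_num
  have h2 : (((pvRow adj path).length : Int) - 1 + 1) = ((pvRow adj path).length : Int) := by ring
  rw [h1, h2, PySem.List.pyRange_one]
  simp only [Int.sub_zero, Int.toNat_natCast, zero_add, List.filter_map, List.map_map]
  unfold pvChildren
  rw [List.filter_congr (q := fun j => decide ((pvRow adj path).getD j 0 = 1 ∨ (pvRow adj path).getD j 0 = -1)) (by intro x _; simp)]
  rfl
def pvCost (adj : List (List Int)) (path : List Int) : Nat → Nat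
  | 0 => 1
  | f+1 => if pvStop path then 1
      else 1 + ((pvChildren adj path).map (fun j : Nat => pvCost adj (path ++ [(j : Int)]) f)).sum

theorem pre_cols (adj : List (List Int)) (hpre : Pre_remove_sublists adj) :
    ∀ row ∈ adj, ∀ j, j < row.length → (row.getD j 0 = 1 ∨ row.getD j 0 = -1) →
      j < adj.length := by
  unfold Pre_remove_sublists at hpre
  simp only [List.all_eq_true, decide_eq_true_eq, List.mem_range,
    Bool.or_eq_true, Bool.not_eq_true', Bool.or_eq_false_iff, beq_eq_false_iff_ne] at hpre
  intro row hrow j hj hv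
  rcases hpre row hrow j hj with h | h
  · rcases hv with hv | hv <;> simp_all
  · exact h

theorem pvStop_eq (path : List Int) (h : path ≠ []) :
    pvStop path = path.dropLast.contains (path.getLast h) := by
  unfold pvStop
  rw [PySem.List.slice_to_neg_one, PySem.List.pyGetD_neg_one _ _ h]

theorem nodup_of_not_stop (path : List Int) (h : path ≠ []) (hn : path.dropLast.Nodup)
    (hs : ¬ pvStop path = true) : path.Nodup := by
  rw [pvStop_eq path h] at hs
  have hrepr : path.dropLast ++ [path.getLast h] = path := List.dropLast_append_getLast h
  rw [← hrepr]
  refine List.Nodup.append hn (List.nodup_singleton _) ?_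
  intro x hx hx'
  rw [List.mem_singleton] at hx'
  subst hx'
  exact hs (by simpa using List.contains_iff_mem.mpr hx)

theorem length_le_of_nodup_range (path : List Int) (n : Nat) (hn : path.Nodup)
    (hb : ∀ e ∈ path, 0 ≤ e ∧ e < (n : Int)) : path.length ≤ n := by
  have h1 : path.length = path.toFinset.card := (List.toFinset_card_of_nodup hn).symm
  have h2 : path.toFinset ⊆ Finset.Ico (0 : Int) n := by
    intro x hx
    rw [List.mem_toFinset] at hx
    rcases hb x hx with ⟨h3, h4⟩
    simp [Finset.mem_Ico, h3, h4]
  have h3 := Finset.card_le_card h2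
  rw [Int.card_Ico] at h3
  omega

theorem pvRow_mem (adj : List (List Int)) (path : List Int) (h : path ≠ [])
    (hb : ∀ e ∈ path, 0 ≤ e ∧ e < (adj.length : Int)) : pvRow adj path ∈ adj := by
  unfold pvRow
  rw [PySem.List.pyGetD_neg_one _ _ h]
  rcases hb (path.getLast h) (List.getLast_mem h) with ⟨h0, hlt⟩
  rw [PySem.List.pyGetD_eq_getElem adj [] h0 (by simpa using hlt)]
  exact List.getElem_mem _

theorem pvChildren_lt (adj : List (List Int)) (path : List Int) (h : path ≠ [])
    (hb : ∀ e ∈ path, 0 ≤ e ∧ e < (adj.length : Int)) (hpre : Pre_remove_sublists adj) :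
    ∀ j ∈ pvChildren adj path, j < adj.length := by
  intro j hj
  unfold pvChildren at hj
  rw [List.mem_filter, List.mem_range, decide_eq_true_eq] at hj
  exact pre_cols adj hpre _ (pvRow_mem adj path h hb) j hj.1 hj.2

theorem loopB_eq (adj : List (List Int)) (hpre : Pre_remove_sublists adj) :
    ∀ (f : Nat) (path : List Int) (rest : List (List Int)) (fuel : Nat),
      path ≠ [] → path.dropLast.Nodup → (∀ e ∈ path, 0 ≤ e ∧ e < (adj.length : Int)) →
      adj.length + 1 ≤ path.length + f →
      loopB adj (path :: rest) (pvCost adj path f + fuel)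
        = iterPathsA adj path (f+1) ++ loopB adj rest fuel := by
  intro f
  induction f with
  | zero =>
    intro path rest fuel h1 h2 h3 h4
    by_cases hs : pvStop path = true
    · have hc : pvCost adj path 0 = 1 := rfl
      rw [hc, Nat.add_comm]
      have hs' := hs; unfold pvStop at hs'
      simp only [loopB, hs', if_true]
      rw [iterPathsA_succ]
      simp [hs]
    · exfalso
      have hnd := nodup_of_not_stop path h1 h2 hs
      have := length_le_of_nodup_range path adj.length hnd h3
      omega
  | succ f ih =>
    intro path rest fuel h1 h2 h3 h4
    have hs' : pvStop path = (PySem.List.slice path none (some (-1))).contains (PySem.List.pyGetD path (-1) 0) := rfl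
    by_cases hs : pvStop path = true
    · have hc : pvCost adj path (f+1) = 1 := by simp [pvCost, hs]
      rw [hc, Nat.add_comm]
      simp only [loopB, ← hs', hs, if_true]
      rw [iterPathsA_succ]
      simp [hs]
    · have hnodup := nodup_of_not_stop path h1 h2 hs
      have hc : pvCost adj path (f+1)
          = 1 + ((pvChildren adj path).map (fun j : Nat => pvCost adj (path ++ [(j : Int)]) f)).sum := by
        simp [pvCost, hs]
      have harith : pvCost adj path (f+1) + fuel
          = (((pvChildren adj path).map (fun j : Nat => pvCost adj (path ++ [(j : Int)]) f)).sum + fuel) + 1 := by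
        rw [hc]; omega
      rw [harith]
      simp only [loopB, ← hs', hs, Bool.false_eq_true, if_false]
      rw [show (PySem.List.pyGetD adj (PySem.List.pyGetD path (-1) 0) []) = pvRow adj path from rfl]
      rw [push_eq]
      suffices h : ∀ (js : List Nat), (∀ j ∈ js, j ∈ pvChildren adj path) →
          ∀ (fuel : Nat),
            loopB adj (js.map (fun j : Nat => path ++ [(j : Int)]) ++ rest)
              ((js.map (fun j : Nat => pvCost adj (path ++ [(j : Int)]) f)).sum + fuel)
            = js.flatMap (fun j : Nat => iterPathsA adj (path ++ [(j : Int)]) (f+1))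
              ++ loopB adj rest fuel by
        rw [h (pvChildren adj path) (fun _ hx => hx) fuel]
        rw [iterPathsA_succ]
        simp [hs]
      intro js
      induction js with
      | nil => intro _ fuel; simp
      | cons j js ihjs =>
        intro hjs fuel
        simp only [List.map_cons, List.sum_cons, List.flatMap_cons, List.cons_append]
        have hj := hjs j List.mem_cons_self
        have hjlt : j < adj.length := pvChildren_lt adj path h1 h3 hpre j hj
        have hstep := ih (path ++ [(j : Int)])
          (js.map (fun j : Nat => path ++ [(j : Int)]) ++ rest)
          ((js.map (fun j : Nat => pvCost adj (path ++ [(j : Int)]) f)).sum + fuel)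
          (by simp)
          (by rw [List.dropLast_concat]; exact hnodup)
          (by
            intro e he
            rcases List.mem_append.mp he with h' | h'
            · exact h3 e h'
            · rw [List.mem_singleton] at h'
              subst h'
              exact ⟨by positivity, by exact_mod_cast hjlt⟩)
          (by simp; omega)
        rw [Nat.add_assoc, hstep,
          ihjs (fun x hx => hjs x (List.mem_cons_of_mem _ hx)) fuel]
        simp


theorem foldl_cons_rev {α β : Type} (g : α → β) :
    ∀ (l : List α) (init : List β),
    l.foldl (fun st x => g x :: st) init = (l.reverse.map g) ++ init := by
  intro l
  induction l with
  | nil => intro init; simp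
  | cons a l ih =>
    intro init
    simp only [List.foldl_cons, List.reverse_cons, List.map_append, List.append_assoc]
    rw [ih]
    simp

theorem bool_eq_of_iff {a b : Bool} (h : a = true ↔ b = true) : a = b := by
  cases a <;> cases b <;> simp_all

theorem loopB_starts (adj : List (List Int)) (hpre : Pre_remove_sublists adj) :
    ∀ (l : List Nat), (∀ i ∈ l, i < adj.length) → ∀ (fuel : Nat),
      loopB adj (l.map (fun i : Nat => [(i : Int)]))
          ((l.map (fun i : Nat => pvCost adj [(i : Int)] adj.length)).sum + fuel)
        = l.flatMap (fun i : Nat => iterPathsA adj [(i : Int)] (adj.length + 1)) := by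
  intro l
  induction l with
  | nil =>
    intro _ fuel
    cases fuel <;> rfl
  | cons i l ih =>
    intro hl fuel
    simp only [List.map_cons, List.sum_cons, List.flatMap_cons]
    have hstep := loopB_eq adj hpre adj.length [(i : Int)] (l.map (fun i : Nat => [(i : Int)]))
      ((l.map (fun i : Nat => pvCost adj [(i : Int)] adj.length)).sum + fuel)
      (by simp) (by simp) (by
        intro e he
        rw [List.mem_singleton] at he
        subst he
        exact ⟨by positivity, by exact_mod_cast hl i List.mem_cons_self⟩)
      (by simp)
    rw [Nat.add_assoc, hstep, ih (fun x hx => hl x (List.mem_cons_of_mem _ hx)) fuel]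

theorem pvCost_le (adj : List (List Int)) :
    ∀ (f : Nat) (path : List Int),
      pvCost adj path f ≤ ((adj.map List.length).foldl max 0 + 1) ^ f := by
  intro f
  induction f with
  | zero => intro path; simp [pvCost]
  | succ f ih =>
    intro path
    set m := (adj.map List.length).foldl max 0 with hm
    by_cases hs : pvStop path = true
    · simp only [pvCost, hs, if_true]
      exact Nat.one_le_pow _ _ (by omega)
    · simp only [pvCost, hs, Bool.false_eq_true, if_false]
      have hlen : (pvChildren adj path).length ≤ m := by
        have h1 : (pvChildren adj path).length ≤ (pvRow adj path).length := by
          unfold pvChildren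
          exact le_trans (List.length_filter_le _ _) (by simp)
        have h2 : (pvRow adj path).length ≤ m := by
          rcases pvRow_mem_or_nil adj path with h | h
          · have := ((PySem.List.le_foldl_max_nat (adj.map List.length) id 0).2
              (pvRow adj path).length (List.mem_map_of_mem h))
            simpa [hm] using this
          · simp [h]
        omega
      have hsum : ((pvChildren adj path).map (fun j : Nat => pvCost adj (path ++ [(j : Int)]) f)).sum
          ≤ (pvChildren adj path).length * (m + 1) ^ f := by
        have := List.sum_le_card_nsmul
          ((pvChildren adj path).map (fun j : Nat => pvCost adj (path ++ [(j : Int)]) f))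
          ((m + 1) ^ f) (by
            intro x hx
            rcases List.mem_map.mp hx with ⟨j, _, rfl⟩
            exact ih _)
        simpa [smul_eq_mul] using this
      have hpow : 1 ≤ (m + 1) ^ f := Nat.one_le_pow _ _ (by omega)
      calc 1 + ((pvChildren adj path).map (fun j : Nat => pvCost adj (path ++ [(j : Int)]) f)).sum
          ≤ 1 + m * (m + 1) ^ f := by
            have := Nat.mul_le_mul_right ((m + 1) ^ f) hlen
            omega
        _ ≤ (m + 1) ^ (f + 1) := by
            rw [pow_succ]
            nlinarith

theorem stack0_eq (adj : List (List Int)) :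
    (PySem.List.pyRange ((adj.length : Int) - 1) (-1) (-1)).foldl (fun st i => [i] :: st) []
      = (List.range adj.length).map (fun i : Nat => [(i : Int)]) := by
  rw [foldl_cons_rev]
  rw [PySem.List.pyRange_neg_one_eq_reverse]
  simp only [List.reverse_reverse, List.append_nil]
  have h1 : ((-1 : Int) + 1) = 0 := by norm_num
  have h2 : ((adj.length : Int) - 1 + 1) = (adj.length : Int) := by ring
  rw [h1, h2, PySem.List.pyRange_one]
  simp [List.map_map]

theorem pathsB_eq (adj : List (List Int)) (hpre : Pre_remove_sublists adj) :
    loopB adj ((PySem.List.pyRange ((adj.length : Int) - 1) (-1) (-1)).foldl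
        (fun st i => [i] :: st) [])
        ((adj.length + 1) * ((adj.map List.length).foldl max 0 + 1) ^ (adj.length + 1) + 1)
      = (List.range adj.length).flatMap (fun i : Nat => iterPathsA adj [(i : Int)] (adj.length + 1)) := by
  rw [stack0_eq]
  set n := adj.length with hn
  set m := (adj.map List.length).foldl max 0 with hm
  set S := ((List.range n).map (fun i : Nat => pvCost adj [(i : Int)] n)).sum with hS
  have hSle : S ≤ n * (m + 1) ^ n := by
    rw [hS]
    have := List.sum_le_card_nsmul ((List.range n).map (fun i : Nat => pvCost adj [(i : Int)] n))
      ((m + 1) ^ n) (by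
        intro x hx
        rcases List.mem_map.mp hx with ⟨i, _, rfl⟩
        exact pvCost_le adj n _)
    simpa [smul_eq_mul] using this
  have hpow : (m + 1) ^ n ≤ (m + 1) ^ (n + 1) := Nat.pow_le_pow_right (by omega) (by omega)
  have hfuel : S ≤ (n + 1) * (m + 1) ^ (n + 1) + 1 := by
    have hmul := Nat.mul_le_mul (show n ≤ n + 1 by omega) hpow
    omega
  have hsplit : (n + 1) * (m + 1) ^ (n + 1) + 1 = S + ((n + 1) * (m + 1) ^ (n + 1) + 1 - S) := by
    omega
  rw [hsplit]
  exact loopB_starts adj hpre (List.range n) (fun i hi => List.mem_range.mp hi) _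

-- the entailment condition, both ways ---------------------------------------

def pvEnt (sl : List (List Char)) (s : List Char) : Prop :=
  s ∈ sl ∧ (1 < sl.count s ∨ ∃ t ∈ sl, s ≠ t ∧ PySem.Chars.isIn s t = true)

theorem count_conv {α : Type} [BEq α] [LawfulBEq α] [DecidableEq α] (l : List α) (x : α) :
    List.count x l = @List.count α instBEqOfDecidableEq x l := by
  rw [List.count_eq_countP, @List.count_eq_countP α instBEqOfDecidableEq]
  apply List.countP_congr
  intro a _
  by_cases h : a = x <;> simp [h]

theorem ent_iff_indices (sl : List (List Char)) (s : List Char) :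
    (∃ i < sl.length, ∃ j < sl.length, ¬ i = j ∧
        PySem.Chars.isIn (sl.getD i []) (sl.getD j []) = true ∧ s = sl.getD i [])
      ↔ pvEnt sl s := by
  constructor
  · rintro ⟨i, hi, j, hj, hne, hin, rfl⟩
    rw [List.getD_eq_getElem sl [] hi] at *
    rw [List.getD_eq_getElem sl [] hj] at hin
    refine ⟨List.getElem_mem hi, ?_⟩
    by_cases heq : sl[j] = sl[i]
    · left
      have hcd : List.Duplicate sl[i] sl := by
        rcases Nat.lt_or_ge i j with hij | hij
        · exact List.duplicate_iff_exists_distinct_get.mpr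
            ⟨⟨i, hi⟩, ⟨j, hj⟩, by exact_mod_cast hij, by simp, by simp [heq]⟩
        · have hij' : j < i := Nat.lt_of_le_of_ne hij (fun hh => hne hh.symm)
          exact List.duplicate_iff_exists_distinct_get.mpr
            ⟨⟨j, hj⟩, ⟨i, hi⟩, by exact_mod_cast hij', by simp [heq], by simp⟩
      have h2 := List.duplicate_iff_two_le_count.mp hcd
      rw [count_conv]
      omega
    · right
      exact ⟨sl[j], List.getElem_mem hj, fun hh => heq hh.symm, hin⟩
  · rintro ⟨hmem, hcase⟩
    rcases hcase with hcount | hex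
    · rw [count_conv] at hcount
      have hdup : List.Duplicate s sl := List.duplicate_iff_two_le_count.mpr (by omega)
      rcases List.duplicate_iff_exists_distinct_get.mp hdup with ⟨n, m, hnm, hn, hm⟩
      have hvn : (n : Nat) < (m : Nat) := hnm
      refine ⟨n, n.isLt, m, m.isLt, by omega, ?_, ?_⟩
      · rw [List.getD_eq_getElem sl [] n.isLt, List.getD_eq_getElem sl [] m.isLt]
        simp only [List.get_eq_getElem] at hn hm
        rw [← hn, ← hm]
        simp [PySem.Chars.isIn_iff_infix]
      · rw [List.getD_eq_getElem sl [] n.isLt]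
        simp only [List.get_eq_getElem] at hn
        exact hn
    · rcases hex with ⟨t, hmt, hne, hin⟩
      rcases List.getElem_of_mem hmem with ⟨i, hi, hsi⟩
      rcases List.getElem_of_mem hmt with ⟨j, hj, hsj⟩
      refine ⟨i, hi, j, hj, ?_, ?_, ?_⟩
      · rintro rfl; exact hne (hsi ▸ hsj ▸ rfl)
      · rw [List.getD_eq_getElem sl [] hi, List.getD_eq_getElem sl [] hj, hsi, hsj]; exact hin
      · rw [List.getD_eq_getElem sl [] hi, hsi]

theorem mem_entailedA (sl : List (List Char)) (x : List Char) :
    x ∈ (List.range sl.length).foldl (fun acc i =>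
        (List.range sl.length).foldl (fun acc2 j =>
          if (!(i == j) && PySem.Chars.isIn (sl.getD i []) (sl.getD j [])) then
            acc2 ++ [sl.getD i []] else acc2) acc) []
      ↔ pvEnt sl x := by
  rw [← ent_iff_indices]
  have hstep : ∀ (acc : List (List Char)), ∀ i ∈ List.range sl.length,
      (List.range sl.length).foldl (fun acc2 j =>
        if (!(i == j) && PySem.Chars.isIn (sl.getD i []) (sl.getD j [])) then
          acc2 ++ [sl.getD i []] else acc2) acc
      = acc ++ (List.range sl.length).flatMap (fun j =>
          if (!(i == j) && PySem.Chars.isIn (sl.getD i []) (sl.getD j [])) = true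
          then [sl.getD i []] else []) := by
    intro acc i _
    exact foldl_if_append_eq
      (fun j => ((!(i == j) && PySem.Chars.isIn (sl.getD i []) (sl.getD j [])) = true))
      (fun _ => [sl.getD i []]) (List.range sl.length) acc
  rw [PySem.List.foldl_congr_mem _ _ _ [] hstep, PySem.List.foldl_append_eq_flatMap]
  simp only [List.nil_append, List.mem_flatMap, List.mem_range]
  constructor
  · rintro ⟨i, hi, j, hj, hx3⟩
    by_cases hc : (!(i == j) && PySem.Chars.isIn (sl.getD i []) (sl.getD j [])) = true
    · rw [if_pos hc, List.mem_singleton] at hx3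
      have hc2 := hc
      simp only [Bool.and_eq_true, Bool.not_eq_true', beq_eq_false_iff_ne] at hc2
      exact ⟨i, hi, j, hj, hc2.1, hc2.2, hx3⟩
    · rw [if_neg hc] at hx3
      simp at hx3
  · rintro ⟨i, hi, j, hj, hne, hin, rfl⟩
    refine ⟨i, hi, j, hj, ?_⟩
    have hc : (!(i == j) && PySem.Chars.isIn (sl.getD i []) (sl.getD j [])) = true := by
      simp only [Bool.and_eq_true, Bool.not_eq_true', beq_eq_false_iff_ne]
      exact ⟨hne, hin⟩
    rw [if_pos hc]
    exact List.mem_singleton.mpr rfl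


-- every enumerated path has length at least 2, so its string is nonempty ----

theorem iterPathsA_len (adj : List (List Int)) :
    ∀ (fuel : Nat) (path : List Int), ∀ q ∈ iterPathsA adj path fuel, 2 ≤ q.length := by
  intro fuel
  induction fuel with
  | zero => intro path q hq; simp [iterPathsA] at hq
  | succ fuel ih =>
    intro path q hq
    rw [iterPathsA_succ] at hq
    rcases List.mem_append.mp hq with h | h
    · split at h <;> simp_all
    · split at h
      · simp at h
      · rcases List.mem_flatMap.mp h with ⟨j, _, hq'⟩
        exact ih (path ++ [(j : Int)]) q hq'

theorem toDigitsCore_len :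
    ∀ (fuel n : Nat) (ds : List Char),
      ds.length ≤ (Nat.toDigitsCore 10 fuel n ds).length := by
  intro fuel
  induction fuel with
  | zero => intro n ds; simp [Nat.toDigitsCore]
  | succ fuel ih =>
    intro n ds
    rw [Nat.toDigitsCore]
    by_cases h10 : n / 10 = 0
    · simp [h10]
    · simp only [h10, if_false]
      have := ih (n / 10) (Nat.digitChar (n % 10) :: ds)
      simp only [List.length_cons] at this
      omega

theorem toChars_ne_nil (e : Int) : PySem.Int.toChars e ≠ [] := by
  unfold PySem.Int.toChars
  split
  · simp
  · unfold Nat.toDigits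
    intro h
    rw [Nat.toDigitsCore] at h
    by_cases h10 : e.toNat / 10 = 0
    · simp [h10] at h
    · simp only [h10, if_false] at h
      have h1 := toDigitsCore_len e.toNat (e.toNat / 10) (Nat.digitChar (e.toNat % 10) :: [])
      rw [h] at h1
      simp at h1

theorem join_nil_eq_flatten (l : List (List Char)) : PySem.Chars.join [] l = l.flatten := by
  induction l with
  | nil => rfl
  | cons a l ih =>
    cases l with
    | nil => show a ++ [] = a ++ [].flatten; rfl
    | cons b t =>
      have h1 : PySem.Chars.join [] (a :: b :: t) = a ++ ([] ++ PySem.Chars.join [] (b :: t)) := rfl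
      rw [h1, ih]
      simp

theorem strP_ne_nil (q : List Int) (h : 2 ≤ q.length) :
    PySem.Chars.join [] (q.map (fun e => PySem.Int.toChars e)) ≠ [] := by
  cases q with
  | nil => simp at h
  | cons a r =>
    rw [join_nil_eq_flatten]
    simp only [List.map_cons, List.flatten_cons]
    intro hc
    rcases List.append_eq_nil_iff.mp hc with ⟨h1, _⟩
    exact toChars_ne_nil a h1

-- membership in conditional set-building folds -------------------------------

theorem mem_ite_add {γ : Type} [BEq γ] [LawfulBEq γ] (c : Prop) [Decidable c]
    (acc : PySem.Set γ) (v x : γ) :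
    x ∈ (if c then PySem.Set.add acc v else acc) ↔ x ∈ acc ∨ (c ∧ x = v) := by
  split
  · rw [PySem.Set.mem_add]
    tauto
  · tauto

theorem mem_foldl_set_acc {α γ : Type} (step : PySem.Set γ → α → PySem.Set γ)
    (Q : α → γ → Prop)
    (h : ∀ (acc : PySem.Set γ) (e : α) (x : γ), x ∈ step acc e ↔ x ∈ acc ∨ Q e x) :
    ∀ (l : List α) (init : PySem.Set γ) (x : γ),
      x ∈ l.foldl step init ↔ x ∈ init ∨ ∃ e ∈ l, Q e x := by
  intro l
  induction l with
  | nil => intro init x; simp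
  | cons a l ih =>
    intro init x
    rw [List.foldl_cons, ih, h]
    constructor
    · rintro (⟨hx | hq⟩ | ⟨e, he, hq⟩)
      · exact Or.inl hx
      · exact Or.inr ⟨a, List.mem_cons_self, hq⟩
      · exact Or.inr ⟨e, List.mem_cons_of_mem _ he, hq⟩
    · rintro (hx | ⟨e, he, hq⟩)
      · exact Or.inl (Or.inl hx)
      · rcases List.mem_cons.mp he with rfl | he
        · exact Or.inl (Or.inr hq)
        · exact Or.inr ⟨e, he, hq⟩

-- the substring enumeration finds exactly the nonempty infixes ----------------

theorem slice_exists_iff (t x : List Char) :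
    (∃ i ∈ List.range t.length,
      ∃ j ∈ PySem.List.pyRange ((i : Int) + 1) ((t.length : Int) + 1) 1,
        x = PySem.List.slice t (some (i : Int)) (some j))
    ↔ (x <:+: t ∧ x ≠ []) := by
  constructor
  · rintro ⟨i, hi, j, hj, rfl⟩
    rw [List.mem_range] at hi
    rw [PySem.List.mem_pyRange_one] at hj
    obtain ⟨j', rfl⟩ : ∃ j' : Nat, j = (j' : Int) := ⟨j.toNat, by omega⟩
    have hij : i < j' := by exact_mod_cast hj.1
    have hjle : j' ≤ t.length := by
      have := hj.2
      omega
    rw [PySem.List.slice_toNat t (by positivity) (by positivity)]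
    simp only [Int.toNat_natCast]
    constructor
    · have hpre : (t.drop i).take (j' - i) <+: t.drop i := List.take_prefix _ _
      rcases hpre with ⟨r, hr⟩
      exact ⟨t.take i, r, by
        conv_rhs => rw [← List.take_append_drop i t, ← hr]
        rw [List.append_assoc]⟩
    · apply List.ne_nil_of_length_pos
      rw [List.length_take, List.length_drop]
      omega
  · rintro ⟨⟨s, r, hsr⟩, hne⟩
    have hx1 : 1 ≤ x.length := by
      cases x
      · simp at hne
      · simp
    have hlen : t.length = s.length + x.length + r.length := by
      rw [← hsr]
      simp
      omega
    refine ⟨s.length, ?_, ((s.length : Int) + (x.length : Int)), ?_, ?_⟩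
    · rw [List.mem_range]
      omega
    · rw [PySem.List.mem_pyRange_one]
      constructor
      · omega
      · omega
    · rw [show ((s.length : Int) + (x.length : Int)) = ((s.length : Nat) : Int) + ((x.length : Nat) : Int) from rfl,
        PySem.List.slice_natCast_add]
      rw [← hsr, List.append_assoc, List.drop_left' rfl]
      exact (List.take_left' rfl).symm

-- B's entailed set holds exactly the pvEnt strings ---------------------------

theorem mem_entailedB (sl : List (List Char)) (hne : ∀ s ∈ sl, s ≠ []) (x : List Char) :
    x ∈ ((sl.foldl (fun d s => d.insert s (d.getD s 0 + 1))
            (PySem.Dict.empty : PySem.Dict (List Char) Int)).keys.foldl (fun acc t =>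
        (List.range t.length).foldl (fun acc2 (i : Nat) =>
          (PySem.List.pyRange ((i : Int) + 1) ((t.length : Int) + 1) 1).foldl (fun acc3 j =>
            if PySem.List.slice t (some (i : Int)) (some j) ≠ t ∧
               (sl.foldl (fun d s => d.insert s (d.getD s 0 + 1))
                 (PySem.Dict.empty : PySem.Dict (List Char) Int)).contains
                   (PySem.List.slice t (some (i : Int)) (some j)) then
              PySem.Set.add acc3 (PySem.List.slice t (some (i : Int)) (some j)) else acc3) acc2) acc)
        ((sl.foldl (fun d s => d.insert s (d.getD s 0 + 1))
            (PySem.Dict.empty : PySem.Dict (List Char) Int)).keys.foldl (fun acc s =>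
          if 1 < (sl.foldl (fun d s => d.insert s (d.getD s 0 + 1))
              (PySem.Dict.empty : PySem.Dict (List Char) Int)).getD s 0 then
            PySem.Set.add acc s else acc) (PySem.Set.empty : PySem.Set (List Char))))
      ↔ pvEnt sl x := by
  simp only [PySem.Dict.foldl_insert_getD_add_one_eq_counter, PySem.Dict.keys_counter,
    PySem.Dict.getD_counter, PySem.Dict.contains_counter]
  have hJ : ∀ (t : List Char) (i : Nat) (acc2 : PySem.Set (List Char)) (x : List Char),
      x ∈ (PySem.List.pyRange ((i : Int) + 1) ((t.length : Int) + 1) 1).foldl (fun acc3 j =>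
            if PySem.List.slice t (some (i : Int)) (some j) ≠ t ∧
               sl.contains (PySem.List.slice t (some (i : Int)) (some j)) = true then
              PySem.Set.add acc3 (PySem.List.slice t (some (i : Int)) (some j)) else acc3) acc2
      ↔ x ∈ acc2 ∨ ∃ j ∈ PySem.List.pyRange ((i : Int) + 1) ((t.length : Int) + 1) 1,
          (PySem.List.slice t (some (i : Int)) (some j) ≠ t ∧
            sl.contains (PySem.List.slice t (some (i : Int)) (some j)) = true) ∧
          x = PySem.List.slice t (some (i : Int)) (some j) := by
    intro t i acc2 x
    exact mem_foldl_set_acc _ _ (fun acc3 j x =>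
      mem_ite_add (PySem.List.slice t (some (i : Int)) (some j) ≠ t ∧
        sl.contains (PySem.List.slice t (some (i : Int)) (some j)) = true) acc3
        (PySem.List.slice t (some (i : Int)) (some j)) x) _ acc2 x
  have hI : ∀ (t : List Char) (acc : PySem.Set (List Char)) (x : List Char),
      x ∈ (List.range t.length).foldl (fun acc2 (i : Nat) =>
          (PySem.List.pyRange ((i : Int) + 1) ((t.length : Int) + 1) 1).foldl (fun acc3 j =>
            if PySem.List.slice t (some (i : Int)) (some j) ≠ t ∧
               sl.contains (PySem.List.slice t (some (i : Int)) (some j)) = true then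
              PySem.Set.add acc3 (PySem.List.slice t (some (i : Int)) (some j)) else acc3) acc2) acc
      ↔ x ∈ acc ∨ ∃ i ∈ List.range t.length,
          ∃ j ∈ PySem.List.pyRange ((i : Int) + 1) ((t.length : Int) + 1) 1,
            (PySem.List.slice t (some (i : Int)) (some j) ≠ t ∧
              sl.contains (PySem.List.slice t (some (i : Int)) (some j)) = true) ∧
            x = PySem.List.slice t (some (i : Int)) (some j) := by
    intro t acc x
    exact mem_foldl_set_acc _ _ (fun acc2 i x => hJ t i acc2 x) _ acc x
  have hT := mem_foldl_set_acc
    (fun acc t =>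
      (List.range t.length).foldl (fun acc2 (i : Nat) =>
        (PySem.List.pyRange ((i : Int) + 1) ((t.length : Int) + 1) 1).foldl (fun acc3 j =>
          if PySem.List.slice t (some (i : Int)) (some j) ≠ t ∧
             sl.contains (PySem.List.slice t (some (i : Int)) (some j)) = true then
            PySem.Set.add acc3 (PySem.List.slice t (some (i : Int)) (some j)) else acc3) acc2) acc)
    (fun t x => ∃ i ∈ List.range t.length,
      ∃ j ∈ PySem.List.pyRange ((i : Int) + 1) ((t.length : Int) + 1) 1,
        (PySem.List.slice t (some (i : Int)) (some j) ≠ t ∧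
          sl.contains (PySem.List.slice t (some (i : Int)) (some j)) = true) ∧
        x = PySem.List.slice t (some (i : Int)) (some j))
    (fun acc t x => hI t acc x)
  rw [hT]
  have hT0 := mem_foldl_set_acc
    (fun acc s => if 1 < ((List.count s sl : Int)) then PySem.Set.add acc s else acc)
    (fun s x => 1 < ((List.count s sl : Int)) ∧ x = s)
    (fun acc s x => mem_ite_add (1 < ((List.count s sl : Int))) acc s x)
  rw [hT0]
  simp only [PySem.Set.empty, List.not_mem_nil, false_or, PySem.Set.mem_ofList]
  unfold pvEnt
  constructor
  · rintro (⟨s, hs, hcnt, rfl⟩ | ⟨t, htm, i, hi, j, hj, ⟨hnet, hcont⟩, rfl⟩)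
    · exact ⟨hs, Or.inl (by exact_mod_cast hcnt)⟩
    · have hxin : PySem.List.slice t (some (i : Int)) (some j) ∈ sl :=
        List.contains_iff_mem.mp hcont
      refine ⟨hxin, Or.inr ⟨t, htm, hnet, ?_⟩⟩
      rw [PySem.Chars.isIn_iff_infix]
      have hh := (slice_exists_iff t (PySem.List.slice t (some (i : Int)) (some j))).mp
        ⟨i, hi, j, hj, rfl⟩
      exact hh.1
  · rintro ⟨hx, hcnt | ⟨t, htm, hnet, hin⟩⟩
    · exact Or.inl ⟨x, hx, by exact_mod_cast hcnt, rfl⟩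
    · right
      rw [PySem.Chars.isIn_iff_infix] at hin
      rcases (slice_exists_iff t x).mpr ⟨hin, hne x hx⟩ with ⟨i, hi, j, hj, hxs⟩
      exact ⟨t, htm, i, hi, j, hj, ⟨by rw [← hxs]; exact hnet,
        by rw [← hxs]; exact List.contains_iff_mem.mpr hx⟩, hxs⟩

-- the two filter conditions agree --------------------------------------------

theorem filter_cond_eq (sl : List (List Char)) (hne : ∀ s ∈ sl, s ≠ []) (p : List Int) :
    (!(((PySem.Set.ofList ((List.range sl.length).foldl (fun acc i =>
        (List.range sl.length).foldl (fun acc2 j =>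
          if (!(i == j) && PySem.Chars.isIn (sl.getD i []) (sl.getD j [])) then
            acc2 ++ [sl.getD i []] else acc2) acc) [])).map
        (fun t => t.map (fun c => (PySem.Int.ofChars? [c]).getD 0))).contains p))
    = (!((PySem.Set.ofList
        (((sl.foldl (fun d s => d.insert s (d.getD s 0 + 1))
            (PySem.Dict.empty : PySem.Dict (List Char) Int)).keys.foldl (fun acc t =>
        (List.range t.length).foldl (fun acc2 (i : Nat) =>
          (PySem.List.pyRange ((i : Int) + 1) ((t.length : Int) + 1) 1).foldl (fun acc3 j =>
            if PySem.List.slice t (some (i : Int)) (some j) ≠ t ∧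
               (sl.foldl (fun d s => d.insert s (d.getD s 0 + 1))
                 (PySem.Dict.empty : PySem.Dict (List Char) Int)).contains
                   (PySem.List.slice t (some (i : Int)) (some j)) then
              PySem.Set.add acc3 (PySem.List.slice t (some (i : Int)) (some j)) else acc3) acc2) acc)
        ((sl.foldl (fun d s => d.insert s (d.getD s 0 + 1))
            (PySem.Dict.empty : PySem.Dict (List Char) Int)).keys.foldl (fun acc s =>
          if 1 < (sl.foldl (fun d s => d.insert s (d.getD s 0 + 1))
              (PySem.Dict.empty : PySem.Dict (List Char) Int)).getD s 0 then
            PySem.Set.add acc s else acc) (PySem.Set.empty : PySem.Set (List Char)))).map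
          (fun s => s.map (fun c => (PySem.Int.ofChars? [c]).getD 0)))).contains p)) := by
  congr 1
  apply bool_eq_of_iff
  rw [List.contains_iff_mem, List.mem_map, PySem.Set.contains_iff, PySem.Set.mem_ofList,
    List.mem_map]
  constructor
  · rintro ⟨t, htm, hparse⟩
    rw [PySem.Set.mem_ofList, mem_entailedA] at htm
    exact ⟨t, (mem_entailedB sl hne t).mpr htm, hparse⟩
  · rintro ⟨t, htm, hparse⟩
    rw [mem_entailedB sl hne] at htm
    exact ⟨t, by rw [PySem.Set.mem_ofList, mem_entailedA]; exact htm, hparse⟩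

-- ===== VERDICT (by name: the statement is the Claim_ definition above) =====
theorem remove_sublists_spec : Claim_equal_remove_sublists := by
  unfold Claim_equal_remove_sublists
  intro adj _ hpre
  unfold Spec_remove_sublists
  simp only [remove_sublists, remove_sublists_alt]
  have hL : (List.range adj.length).foldl
      (fun acc (i : Nat) => acc ++ iterPathsA adj [(i : Int)] (adj.length + 1)) []
      = (List.range adj.length).flatMap (fun i : Nat => iterPathsA adj [(i : Int)] (adj.length + 1)) := by
    rw [PySem.List.foldl_append_eq_flatMap]
    rfl
  rw [hL, pathsB_eq adj hpre]
  set L := (List.range adj.length).flatMap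
    (fun i : Nat => iterPathsA adj [(i : Int)] (adj.length + 1)) with hLdef
  have hlen : ∀ q ∈ L, 2 ≤ q.length := by
    intro q hq
    rw [hLdef, List.mem_flatMap] at hq
    rcases hq with ⟨i, _, hqi⟩
    exact iterPathsA_len adj _ _ q hqi
  have hstr : (L.map (fun sub => sub.map (fun e => PySem.Int.toChars e))).map
      (fun sub => PySem.Chars.join [] sub)
      = L.map (fun p => PySem.Chars.join [] (p.map (fun e => PySem.Int.toChars e))) := by
    rw [List.map_map]
    rfl
  have hne : ∀ s ∈ L.map (fun p => PySem.Chars.join [] (p.map (fun e => PySem.Int.toChars e))),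
      s ≠ [] := by
    intro s hs
    rcases List.mem_map.mp hs with ⟨q, hq, rfl⟩
    exact strP_ne_nil q (hlen q hq)
  apply List.filter_congr
  intro p hp
  rw [hstr]
  have h := filter_cond_eq
    (L.map (fun p => PySem.Chars.join [] (p.map (fun e => PySem.Int.toChars e)))) hne p
  rw [h]
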